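-- pv_equiv track=rewrite | github.com/aboucaud/adventofcode2017 | day06.py | count_redistribution_cycles
-- ===== SOURCE A (Python) =====
-- from typing import List
-- import itertools
--
-- def count_redistribution_cycles(bank: List[int]) -> int:
--     bank_memory = []
--     bank_memory.append(tuple(bank))
--
--     for i in itertools.count(1):
--         bank = redistribute_blocks(bank)
--         if tuple(bank) in bank_memory:
--             return i
--         bank_memory.append(tuple(bank))
--
--     return 0
--
-- def redistribute_blocks(bank: List[int]) -> List[int]:
--     bank_size = len(bank)
--     idx = bank.index(max(bank))
--     blocks = bank[idx]
--     bank[idx] = 0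
--
--     while blocks > 0:
--         idx += 1
--         bank[idx % bank_size] += 1
--         blocks -= 1
--
--     return bank
-- ===== SOURCE B (Python) =====
-- from typing import List
--
--
-- def _redistribute(state: tuple) -> tuple:
--     """One redistribution step, computed in closed form: the largest cell is
--     emptied and its blocks are spread with divmod instead of one unit at a time."""
--     n = len(state)
--     m = max(state)
--     idx = state.index(m)
--     blocks = m if m > 0 else 0          # nothing to hand out from a non-positive maximum
--     q, r = divmod(blocks, n)
--     return tuple((0 if j == idx else v) + q + (1 if (j - idx - 1) % n < r else 0)
--                  for j, v in enumerate(state))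
--
--
-- def count_redistribution_cycles(bank: List[int]) -> int:
--     state = tuple(bank)
--     seen = {state}
--     count = 0
--     while True:
--         state = _redistribute(state)
--         count += 1
--         if state in seen:
--             return count
--         seen.add(state)
-- ===== Notes on version B (the rewrite author's own statement) =====
-- stated objective: alternative
-- what changed: B replaces A's unit-by-unit while-loop redistribution with a closed-form divmod step (each cell gets q plus 1 if it lies in the first r slots after the maximum) over immutable tuples, and tracks seen states in a set instead of scanning a growing list.
import Mathlib
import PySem

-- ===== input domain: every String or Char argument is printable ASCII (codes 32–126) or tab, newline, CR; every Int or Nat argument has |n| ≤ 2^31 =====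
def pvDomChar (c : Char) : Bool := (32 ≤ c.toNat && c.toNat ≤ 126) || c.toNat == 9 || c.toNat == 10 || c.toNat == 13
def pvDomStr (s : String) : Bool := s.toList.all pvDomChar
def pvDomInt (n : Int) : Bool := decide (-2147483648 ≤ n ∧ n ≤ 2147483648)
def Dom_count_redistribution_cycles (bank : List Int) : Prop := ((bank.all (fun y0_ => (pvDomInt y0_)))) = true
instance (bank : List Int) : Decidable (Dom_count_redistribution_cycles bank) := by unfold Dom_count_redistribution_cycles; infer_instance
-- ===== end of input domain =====

-- B replaces A's unit-by-unit block distribution with a closed-form divmod redistribution step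
-- and a first-insertion-order seen set; equivalence is about the RETURN value only (Python A
-- mutates the caller's list in place, B does not).

-- fuel: a cheap, generously large totality guard for the repeat-search loop of both ports
-- (both Pythons loop until a state repeats; the guard only makes the recursion structural).
def pvFuel (bank : List Int) : Nat :=
  ((bank.foldl (fun a x => a + x.natAbs) 0 + 2) * (bank.length + 2)) ^ (bank.length + 2)

-- ===== PORT A =====
def pvDistA (bank : List Int) (bank_size : Nat) (idx blocks : Int) : List Int :=
  -- while blocks > 0: idx += 1; bank[idx % bank_size] += 1; blocks -= 1
  if h : blocks > 0 then
    pvDistA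
      (PySem.List.pySetD bank (PySem.Int.mod (idx + 1) (bank_size : Int))
        (PySem.List.pyGetD bank (PySem.Int.mod (idx + 1) (bank_size : Int)) 0 + 1))
      bank_size (idx + 1) (blocks - 1)
  else bank
termination_by blocks.toNat
decreasing_by omega

def pvRedistributeA (bank : List Int) : List Int :=
  -- idx = bank.index(max(bank)); blocks = bank[idx]; bank[idx] = 0; then the while loop
  pvDistA
    (PySem.List.pySetD bank (((PySem.List.index? bank ((PySem.List.max? bank (fun x => x)).getD 0)).getD 0 : Nat) : Int) 0)
    bank.length
    (((PySem.List.index? bank ((PySem.List.max? bank (fun x => x)).getD 0)).getD 0 : Nat) : Int)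
    (PySem.List.pyGetD bank (((PySem.List.index? bank ((PySem.List.max? bank (fun x => x)).getD 0)).getD 0 : Nat) : Int) 0)

def pvLoopA (fuel : Nat) (bank : List Int) (memory : List (List Int)) (i : Int) : Int :=
  match fuel with
  | 0 => 0
  | fuel + 1 =>
    if pvRedistributeA bank ∈ memory then i
    else pvLoopA fuel (pvRedistributeA bank) (memory ++ [pvRedistributeA bank]) (i + 1)

def count_redistribution_cycles (bank : List Int) : Int :=
  if bank = [] then 0   -- Python raises ValueError on an empty bank; excluded by Pre_
  else pvLoopA (pvFuel bank) bank [bank] 1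

-- ===== PORT B =====
def pvStepBgo (state : List Int) (n : Nat) (idx : Nat) (q r : Int) : List Int :=
  (PySem.List.enumerate state 0).map (fun p =>
    (if p.1 = (idx : Int) then 0 else p.2) + q +
    (if PySem.Int.mod (p.1 - (idx : Int) - 1) (n : Int) < r then 1 else 0))

def pvStepB (state : List Int) : List Int :=
  -- m = max(state); idx = state.index(m); q, r = divmod(max(m, 0), n); then the comprehension
  pvStepBgo state state.length
    ((PySem.List.index? state ((PySem.List.max? state (fun x => x)).getD 0)).getD 0)
    (PySem.Int.floordiv (if ((PySem.List.max? state (fun x => x)).getD 0) > 0 then ((PySem.List.max? state (fun x => x)).getD 0) else 0) (state.length : Int))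
    (PySem.Int.mod (if ((PySem.List.max? state (fun x => x)).getD 0) > 0 then ((PySem.List.max? state (fun x => x)).getD 0) else 0) (state.length : Int))

def pvLoopB (fuel : Nat) (state : List Int) (seen : PySem.Set (List Int)) (count : Int) : Int :=
  match fuel with
  | 0 => 0
  | fuel + 1 =>
    if pvStepB state ∈ seen then count + 1
    else pvLoopB fuel (pvStepB state) (PySem.Set.add seen (pvStepB state)) (count + 1)

def count_redistribution_cycles_alt (bank : List Int) : Int :=
  if bank = [] then 0   -- Python raises ValueError on an empty bank; excluded by Pre_
  else pvLoopB (pvFuel bank) bank (PySem.Set.ofList [bank]) 0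

-- ===== PRECONDITION & SPEC =====
-- Both Pythons raise ValueError (max of an empty sequence) on the empty bank; nothing else raises.
def Pre_count_redistribution_cycles (bank : List Int) : Prop := bank ≠ []
instance (bank : List Int) : Decidable (Pre_count_redistribution_cycles bank) := by
  unfold Pre_count_redistribution_cycles; infer_instance
def pvWitness_count_redistribution_cycles : List Int := [0, 2, 7, 0]

def Spec_count_redistribution_cycles (bank : List Int) (out : Int) : Prop :=
  out = count_redistribution_cycles_alt bank
instance (bank : List Int) (out : Int) : Decidable (Spec_count_redistribution_cycles bank out) := by
  unfold Spec_count_redistribution_cycles; infer_instance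

-- ===== CLAIM (what is proved, stated in full; the proofs are below) =====
def Claim_equal_count_redistribution_cycles : Prop :=
  ∀ (bank : List Int), Dom_count_redistribution_cycles bank →
    Pre_count_redistribution_cycles bank →
    Spec_count_redistribution_cycles bank (count_redistribution_cycles bank)

-- ===== LEMMAS AND PROOFS =====

-- distribution-count helper (proof-side): pvC n idx k j = how many of the k unit blocks
-- handed out starting after index idx land on cell j (mod n)
def pvC (n : Nat) (idx : Int) (k : Nat) (j : Nat) : Int :=
  match k with
  | 0 => 0
  | k + 1 => (if (idx + 1) % (n : Int) = (j : Int) then 1 else 0) + pvC n (idx + 1) k j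

theorem pv_emod_small (x n : Int) (h1 : -n < x) (h2 : x < n) :
    x % n = if 0 ≤ x then x else x + n := by
  split_ifs with h
  · exact Int.emod_eq_of_lt h h2
  · rw [(Int.add_emod_right x n).symm]
    exact Int.emod_eq_of_lt (by omega) (by omega)

theorem pv_distA_eq (n : Nat) (hn : 0 < n) :
    ∀ (k : Nat) (l : List Int) (idx : Int), l.length = n →
      pvDistA l n idx (k : Int) = l.mapIdx (fun j v => v + pvC n idx k j) := by
  intro k
  induction k with
  | zero =>
    intro l idx hl
    rw [pvDistA, dif_neg (by simp)]
    apply List.ext_getElem (by simp)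
    intro j h1 h2
    simp [pvC]
  | succ k ih =>
    intro l idx hl
    rw [pvDistA, dif_pos (by push_cast; omega)]
    have hcast : ((k + 1 : Nat) : Int) - 1 = (k : Int) := by push_cast; ring
    rw [hcast]
    have hmod : PySem.Int.mod (idx + 1) (n : Int) = (idx + 1) % (n : Int) :=
      PySem.Int.mod_eq_emod_of_pos (by exact_mod_cast hn)
    have hj0 : 0 ≤ (idx + 1) % (n : Int) := Int.emod_nonneg _ (by omega)
    have hjn : (idx + 1) % (n : Int) < n := Int.emod_lt_of_pos _ (by exact_mod_cast hn)
    rw [hmod, PySem.List.pySetD_of_nonneg _ _ hj0, PySem.List.pyGetD_of_nonneg _ _ hj0]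
    have hlen : (l.set ((idx + 1) % (n : Int)).toNat (l.getD ((idx + 1) % (n : Int)).toNat 0 + 1)).length = n := by
      simp [hl]
    rw [ih _ (idx + 1) hlen]
    apply List.ext_getElem (by simp [hl])
    intro j h1 h2
    have hjlt : j < n := by simpa [hl] using h2
    have htn : ((idx + 1) % (n : Int)).toNat < l.length := by omega
    have hgd : l.getD ((idx + 1) % (n : Int)).toNat 0 = l[((idx + 1) % (n : Int)).toNat]'htn :=
      List.getD_eq_getElem l 0 htn
    simp only [List.getElem_mapIdx, List.getElem_set]
    by_cases heq : ((idx + 1) % (n : Int)).toNat = j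
    · have hind : (idx + 1) % (n : Int) = (j : Int) := by omega
      rw [if_pos heq, hgd]
      simp only [heq]
      simp [pvC, hind]
      ring
    · have hind : ¬ ((idx + 1) % (n : Int) = (j : Int)) := by omega
      rw [if_neg heq]
      simp [pvC, hind]

theorem pv_C_floor (n : Nat) (hn : 0 < n) :
    ∀ (k : Nat) (idx : Int) (j : Nat), j < n →
      pvC n idx k j = ((k : Int) + n - 1 - ((j : Int) - idx - 1) % n) / n := by
  intro k
  induction k with
  | zero =>
    intro idx j hj
    have hd0 : 0 ≤ ((j : Int) - idx - 1) % n := Int.emod_nonneg _ (by omega)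
    have hdn : ((j : Int) - idx - 1) % n < n := Int.emod_lt_of_pos _ (by exact_mod_cast hn)
    simp only [pvC, Nat.cast_zero]
    rw [Int.ediv_eq_zero_of_lt (by omega) (by omega)]
  | succ k ih =>
    intro idx j hj
    have hnz : (n : Int) ≠ 0 := by omega
    have hnpos : (0 : Int) < n := by exact_mod_cast hn
    set d := ((j : Int) - idx - 1) % n with hd
    have hd0 : 0 ≤ d := Int.emod_nonneg _ hnz
    have hdn : d < n := Int.emod_lt_of_pos _ hnpos
    have hdd : d % (n : Int) = d := by rw [hd]; exact Int.emod_emod_of_dvd _ dvd_rfl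
    -- the count for the tail starts one slot later
    have hd' : ((j : Int) - (idx + 1) - 1) % n = (d - 1) % n := by
      have h1 : (j : Int) - (idx + 1) - 1 = ((j : Int) - idx - 1) - 1 := by ring
      rw [h1, Int.sub_emod ((j : Int) - idx - 1) 1, Int.sub_emod d 1, ← hd, hdd]
    -- the head indicator fires exactly when d = 0
    have hje : (j : Int) % n = (j : Int) := Int.emod_eq_of_lt (by omega) (by exact_mod_cast hj)
    set e := (idx + 1) % (n : Int) with he
    have he0 : 0 ≤ e := Int.emod_nonneg _ hnz
    have hen : e < n := Int.emod_lt_of_pos _ hnpos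
    have hjn : (j : Int) < n := by exact_mod_cast hj
    have hde : d = ((j : Int) - e) % n := by
      have h1 : (j : Int) - idx - 1 = (j : Int) - (idx + 1) := by ring
      rw [hd, h1, Int.sub_emod ((j : Int)) (idx + 1), ← he,
        Int.sub_emod ((j : Int)) e, Int.emod_emod_of_dvd _ dvd_rfl]
    have hsmall : ((j : Int) - e) % n = if 0 ≤ (j : Int) - e then (j : Int) - e else (j : Int) - e + n :=
      pv_emod_small _ _ (by omega) (by omega)
    have hiff : (e = (j : Int)) ↔ d = 0 := by
      rw [hde, hsmall]; split_ifs <;> omega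
    simp only [pvC]
    rw [ih (idx + 1) j hj, hd']
    by_cases hd0' : d = 0
    · rw [if_pos (hiff.mpr hd0'), hd0']
      have hm1 : ((-1 : Int)) % n = -1 + n := by
        rw [(Int.add_emod_right (-1) n).symm]
        exact Int.emod_eq_of_lt (by omega) (by omega)
      have : ((0 : Int) - 1) % n = -1 + n := by rw [show ((0:Int) - 1) = -1 by ring, hm1]
      rw [this]
      have hnum : ((k : Int) + n - 1 - (-1 + n)) = (k : Int) := by ring
      rw [hnum]
      have hr : ((k + 1 : Nat) : Int) + n - 1 - 0 = (k : Int) + 1 * n := by push_cast; ring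
      rw [hr, Int.add_mul_ediv_right _ _ hnz]
      ring
    · rw [if_neg (fun h => hd0' (hiff.mp h))]
      have hdm : (d - 1) % (n : Int) = d - 1 :=
        Int.emod_eq_of_lt (by omega) (by omega)
      rw [hdm]
      have : ((k : Int) + n - 1 - (d - 1)) = ((k + 1 : Nat) : Int) + n - 1 - d := by push_cast; ring
      rw [this]
      ring

theorem pv_floor_split (n : Nat) (hn : 0 < n) (k : Nat) (d : Int) (hd0 : 0 ≤ d) (hdn : d < n) :
    ((k : Int) + n - 1 - d) / n = (k : Int) / n + (if d < (k : Int) % n then 1 else 0) := by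
  have hnz : (n : Int) ≠ 0 := by omega
  have hnpos : (0 : Int) < n := by exact_mod_cast hn
  have hk := Int.mul_ediv_add_emod (k : Int) n
  set q := (k : Int) / n with hq
  set r := (k : Int) % n with hr
  have hr0 : 0 ≤ r := Int.emod_nonneg _ hnz
  have hrn : r < n := Int.emod_lt_of_pos _ hnpos
  have hsplit : (k : Int) + n - 1 - d = (r + n - 1 - d) + q * n := by rw [← hk]; ring
  rw [hsplit, Int.add_mul_ediv_right _ _ hnz]
  split_ifs with h
  · have h2 : r + n - 1 - d = (r - 1 - d) + 1 * n := by ring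
    rw [h2, Int.add_mul_ediv_right _ _ hnz, Int.ediv_eq_zero_of_lt (by omega) (by omega)]
    ring
  · rw [Int.ediv_eq_zero_of_lt (by omega) (by omega)]
    ring

theorem pv_step_eq (st : List Int) (hst : st ≠ []) : pvRedistributeA st = pvStepB st := by
  have hn : 0 < st.length := List.length_pos_of_ne_nil hst
  obtain ⟨m, hm⟩ : ∃ m, PySem.List.max? st (fun x => x) = some m := by
    cases h : PySem.List.max? st (fun x => x) with
    | none => exact absurd ((PySem.List.max?_eq_none_iff st _).mp h) hst
    | some m => exact ⟨m, rfl⟩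
  have hmem : m ∈ st := PySem.List.max?_mem hm
  obtain ⟨i0, hi0⟩ : ∃ i0, PySem.List.index? st m = some i0 := by
    cases h : PySem.List.index? st m with
    | none =>
      have h2 := (PySem.List.index?_isSome_iff st m).mpr hmem
      rw [h] at h2
      simp at h2
    | some i0 => exact ⟨i0, rfl⟩
  obtain ⟨hi0lt, hsti0, -⟩ := PySem.List.getElem_of_index?_eq_some hi0
  have hnz : (st.length : Int) ≠ 0 := by omega
  have hnpos : (0 : Int) < st.length := by exact_mod_cast hn
  unfold pvRedistributeA pvStepB pvStepBgo
  rw [hm]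
  simp only [Option.getD_some]
  simp only [hi0]
  simp only [Option.getD_some, PySem.List.pySetD_natCast]
  have hget : PySem.List.pyGetD st ((i0 : Nat) : Int) 0 = m := by
    rw [PySem.List.pyGetD_natCast, List.getD_eq_getElem st 0 hi0lt, hsti0]
  rw [hget]
  have hsetlen : (st.set i0 0).length = st.length := by simp
  by_cases hm0 : m > 0
  · -- positive maximum: k := m.toNat blocks are handed out
    have hmk : m = ((m.toNat : Nat) : Int) := by omega
    rw [if_pos hm0]
    rw [hmk, pv_distA_eq st.length hn m.toNat _ _ hsetlen]
    apply List.ext_getElem (by simp [PySem.List.length_enumerate])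
    intro j h1 h2
    have hjlt : j < st.length := by simpa using h1
    simp only [List.getElem_mapIdx, List.getElem_set, List.getElem_map,
      PySem.List.getElem_enumerate, zero_add]
    rw [pv_C_floor st.length hn m.toNat ((i0 : Nat) : Int) j hjlt,
      pv_floor_split st.length hn m.toNat _ (Int.emod_nonneg _ hnz) (Int.emod_lt_of_pos _ hnpos)]
    simp only [PySem.Int.floordiv_eq_ediv_of_pos hnpos, PySem.Int.mod_eq_emod_of_pos hnpos]
    simp only [show ((j : Int) = (i0 : Int)) ↔ (i0 = j) from by omega]
    ring
  · -- non-positive maximum: no block moves, only the maximal cell is zeroed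
    rw [if_neg hm0, pvDistA, dif_neg hm0]
    have hq0 : PySem.Int.floordiv 0 (st.length : Int) = 0 := by
      rw [PySem.Int.floordiv_eq_ediv_of_pos hnpos]; simp
    have hr0 : PySem.Int.mod 0 (st.length : Int) = 0 := by
      rw [PySem.Int.mod_eq_emod_of_pos hnpos]; simp
    rw [hq0, hr0]
    apply List.ext_getElem (by simp [PySem.List.length_enumerate])
    intro j h1 h2
    have hjlt : j < st.length := by simpa using h1
    simp only [List.getElem_set, List.getElem_map, PySem.List.getElem_enumerate, zero_add]
    have hmodn : ¬ (PySem.Int.mod ((j : Int) - (i0 : Int) - 1) (st.length : Int) < 0) := by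
      rw [PySem.Int.mod_eq_emod_of_pos hnpos]
      exact not_lt.mpr (Int.emod_nonneg _ hnz)
    rw [if_neg hmodn]
    simp only [show ((j : Int) = (i0 : Int)) ↔ (i0 = j) from by omega]
    ring

theorem pv_stepB_ne_nil (st : List Int) (hst : st ≠ []) : pvStepB st ≠ [] := by
  have hl : (pvStepB st).length = st.length := by
    unfold pvStepB pvStepBgo
    simp [PySem.List.length_enumerate]
  intro h
  rw [h] at hl
  simp at hl
  exact hst (List.eq_nil_of_length_eq_zero hl.symm)

theorem pv_loops_eq :
    ∀ (fuel : Nat) (st : List Int) (mem : List (List Int)) (i : Int), st ≠ [] →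
      pvLoopA fuel st mem (i + 1) = pvLoopB fuel st mem i := by
  intro fuel
  induction fuel with
  | zero => intro st mem i hst; rfl
  | succ f ih =>
    intro st mem i hst
    simp only [pvLoopA, pvLoopB]
    rw [pv_step_eq st hst]
    by_cases hmem : pvStepB st ∈ mem
    · rw [if_pos hmem, if_pos hmem]
    · rw [if_neg hmem, if_neg hmem, PySem.Set.add_of_not_mem hmem]
      exact ih (pvStepB st) (mem ++ [pvStepB st]) (i + 1) (pv_stepB_ne_nil st hst)

-- ===== VERDICT (by name: the statement is the Claim_ definition above) =====
theorem count_redistribution_cycles_spec : Claim_equal_count_redistribution_cycles := by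
  intro bank _ hpre
  unfold Spec_count_redistribution_cycles count_redistribution_cycles count_redistribution_cycles_alt
  rw [if_neg hpre, if_neg hpre]
  rw [PySem.Set.ofList_eq_self_of_nodup [bank] (by simp)]
  have h := pv_loops_eq (pvFuel bank) bank [bank] 0 hpre
  simpa using h
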